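-- pv_equiv track=rewrite | github.com/bbbradsmith/nes-audio-tests | misc/filtermatch.py | ideal_step
-- ===== SOURCE A (Python) =====
-- def ideal_step(w,t):
--     o = []
--     s = 0
--     for v in w:
--         if v > t:
--             s = 1
--         o.append(s)
--     return o
-- ===== SOURCE B (Python) =====
-- def ideal_step(w, t):
--     w = list(w)
--     k = next((i for i, v in enumerate(w) if v > t), len(w))
--     return [0] * k + [1] * (len(w) - k)
-- ===== Notes on version B (the rewrite author's own statement) =====
-- stated objective: simpler
-- what changed: Replaces the flag-carrying element-by-element append loop with finding the first index whose value exceeds the threshold and bulk-building [0]*k + [1]*(n-k).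
import Mathlib
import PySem

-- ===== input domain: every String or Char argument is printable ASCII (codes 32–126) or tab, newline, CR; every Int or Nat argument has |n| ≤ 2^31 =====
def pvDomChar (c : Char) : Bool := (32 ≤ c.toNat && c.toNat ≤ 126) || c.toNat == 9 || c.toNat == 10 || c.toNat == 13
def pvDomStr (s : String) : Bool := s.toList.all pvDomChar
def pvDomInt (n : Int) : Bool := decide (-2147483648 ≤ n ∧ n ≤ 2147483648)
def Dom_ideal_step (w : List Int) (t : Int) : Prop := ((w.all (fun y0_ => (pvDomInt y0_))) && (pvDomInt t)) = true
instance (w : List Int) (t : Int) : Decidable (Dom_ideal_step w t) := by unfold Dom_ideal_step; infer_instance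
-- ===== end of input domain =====

-- ===== PORT A =====
def ideal_step (w : List Int) (t : Int) : List Int :=
  (w.foldl (fun (st : List Int × Int) v =>
    let s := if v > t then 1 else st.2
    (st.1 ++ [s], s)) ([], 0)).1

-- ===== PORT B =====
-- index of the first element exceeding t (w.length if none), then bulk-fill
def firstExceed (w : List Int) (t : Int) : Nat :=
  match w with
  | [] => 0
  | v :: r => if v > t then 0 else firstExceed r t + 1

def ideal_step_alt (w : List Int) (t : Int) : List Int :=
  List.replicate (firstExceed w t) 0 ++ List.replicate (w.length - firstExceed w t) 1

-- ===== PRECONDITION & SPEC =====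
def Spec_ideal_step (w : List Int) (t : Int) (out : List Int) : Prop := out = ideal_step_alt w t
instance (w : List Int) (t : Int) (out : List Int) : Decidable (Spec_ideal_step w t out) := by unfold Spec_ideal_step; infer_instance

-- ===== CLAIM (what is proved, stated in full; the proofs are below) =====
def Claim_equal_ideal_step : Prop := ∀ (w : List Int) (t : Int), Dom_ideal_step w t → Spec_ideal_step w t (ideal_step w t)

-- ===== LEMMAS AND PROOFS =====

-- ===== VERDICT (by name: the statement is the Claim_ definition above) =====
lemma loop_one (t : Int) (w : List Int) : ∀ acc : List Int,
    (w.foldl (fun (st : List Int × Int) v =>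
      let s := if v > t then 1 else st.2
      (st.1 ++ [s], s)) (acc, 1)).1 = acc ++ List.replicate w.length 1 := by
  induction w with
  | nil => intro acc; simp
  | cons v r ih =>
    intro acc
    simp only [List.foldl_cons]
    by_cases h : v > t <;>
      simp [h, ih, List.replicate_succ, List.append_assoc]

lemma loop_zero (t : Int) (w : List Int) : ∀ acc : List Int,
    (w.foldl (fun (st : List Int × Int) v =>
      let s := if v > t then 1 else st.2
      (st.1 ++ [s], s)) (acc, 0)).1 = acc ++ ideal_step_alt w t := by
  induction w with
  | nil => intro acc; simp [ideal_step_alt, firstExceed]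
  | cons v r ih =>
    intro acc
    simp only [List.foldl_cons]
    by_cases h : v > t
    · simp [h, loop_one, ideal_step_alt, firstExceed,
        List.replicate_succ, List.append_assoc]
    · simp [h, ih, ideal_step_alt, firstExceed,
        List.replicate_succ, List.append_assoc]

theorem ideal_step_spec : Claim_equal_ideal_step := by
  intro w t _
  unfold Spec_ideal_step ideal_step
  simpa using loop_zero t w []
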